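-- pv_equiv track=rewrite | github.com/hadam1011/Code_Python_PTIT | solocphatdep.py | solve
-- ===== SOURCE A (Python) =====
-- def solve(n):
--     dem = 0
--     if n[0] != '6': return 0
--     for i in n:
--         dem += 1
--         if i != '6' and i != '8':   return 0
--         if i == '6':    dem = 0
--         if dem == 3 and i != '6':   return 0
--     return 1
-- ===== SOURCE B (Python) =====
-- def solve(n):
--     if n[0] != '6':
--         return 0
--     return 1 if all(c in '68' for c in n) and '888' not in n else 0
-- ===== Notes on version B (the rewrite author's own statement) =====
-- stated objective: idiomatic
-- what changed: Replaced A's stateful running-counter scan with early returns by a declarative check: first char is '6', every char is '6' or '8', and '888' does not occur as a substring.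
import Mathlib
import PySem

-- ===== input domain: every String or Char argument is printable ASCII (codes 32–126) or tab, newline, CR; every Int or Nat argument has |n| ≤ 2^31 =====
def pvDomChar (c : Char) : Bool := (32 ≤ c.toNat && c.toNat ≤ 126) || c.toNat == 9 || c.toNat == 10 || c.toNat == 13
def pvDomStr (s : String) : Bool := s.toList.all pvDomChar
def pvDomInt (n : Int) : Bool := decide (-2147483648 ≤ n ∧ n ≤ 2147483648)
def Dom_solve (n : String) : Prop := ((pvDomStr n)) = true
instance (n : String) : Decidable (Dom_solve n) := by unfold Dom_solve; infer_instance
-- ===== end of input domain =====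

-- B replaces A's stateful running-counter scan by a declarative check (all chars in {6,8}, no '888' substring): idiomatic, same cost.

-- ===== PORT A =====
-- the for-loop of A with its running counter `dem` and early returns
def solveLoop : List Char → Int → Int
  | [], _ => 1
  | c :: cs, dem =>
    let dem := dem + 1
    if c ≠ '6' ∧ c ≠ '8' then 0
    else
      let dem := if c = '6' then 0 else dem
      if dem = 3 ∧ c ≠ '6' then 0 else solveLoop cs dem

def solve (n : String) : Int :=
  match PySem.Str.pyGet? n 0 with
  | none => 0            -- n[0] raises IndexError in Python; excluded by Pre_solve
  | some c => if c ≠ '6' then 0 else solveLoop n.toList 0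

-- ===== PORT B =====
-- hand port of Python's substring test `'888' not in n` (exact: chars are single code points)
def noTriple : List Char → Bool
  | '8' :: '8' :: '8' :: _ => false
  | _ :: cs => noTriple cs
  | [] => true

def solve_alt (n : String) : Int :=
  match PySem.Str.pyGet? n 0 with
  | none => 0            -- n[0] raises IndexError in Python; excluded by Pre_solve
  | some c =>
    if c ≠ '6' then 0
    else if n.toList.all (fun ch => ch = '6' || ch = '8') && noTriple n.toList then 1 else 0

-- ===== PRECONDITION & SPEC =====
-- A raises IndexError on the empty string (n[0]); both Pythons raise there.
def Pre_solve (n : String) : Prop := n ≠ ""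
instance (n : String) : Decidable (Pre_solve n) := by unfold Pre_solve; infer_instance
def pvWitness_solve : String := "688"

def Spec_solve (n : String) (out : Int) : Prop := out = solve_alt n
instance (n : String) (out : Int) : Decidable (Spec_solve n out) := by unfold Spec_solve; infer_instance

-- ===== CLAIM (what is proved, stated in full; the proofs are below) =====
def Claim_equal_solve : Prop := ∀ (n : String), Dom_solve n → Pre_solve n → Spec_solve n (solve n)

-- ===== LEMMAS AND PROOFS =====

-- counter-style no-three-consecutive-8s check, the invariant shape of A's loop
def nt8 : List Char → Int → Bool
  | [], _ => true
  | c :: cs, d => if c = '6' then nt8 cs 0 else if d + 1 = 3 then false else nt8 cs (d + 1)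

def okc (c : Char) : Bool := c = '6' || c = '8'

lemma solveLoop_eq (cs : List Char) : ∀ d : Int, 0 ≤ d → d < 3 →
    solveLoop cs d = if cs.all okc && nt8 cs d then 1 else 0 := by
  induction cs with
  | nil => intro d _ _; simp [solveLoop, nt8]
  | cons c cs ih =>
    intro d hd0 hd3
    by_cases h6 : c = '6'
    · subst h6
      rw [show solveLoop ('6' :: cs) d = solveLoop cs 0 from by simp [solveLoop]]
      rw [ih 0 le_rfl (by norm_num)]
      simp [nt8, okc]
    · by_cases h8 : c = '8'
      · subst h8
        rw [show solveLoop ('8' :: cs) d = if d + 1 = 3 then 0 else solveLoop cs (d + 1) from by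
          simp [solveLoop]]
        by_cases h3 : d + 1 = 3
        · simp [h3, nt8]
        · rw [if_neg h3, ih (d + 1) (by omega) (by omega)]
          simp [nt8, h3, okc]
      · simp [solveLoop, nt8, okc, h6, h8]

lemma nt8_eq (cs : List Char) : cs.all okc = true →
    nt8 cs 0 = noTriple cs ∧ nt8 cs 1 = noTriple ('8' :: cs) ∧ nt8 cs 2 = noTriple ('8' :: '8' :: cs) := by
  induction cs with
  | nil => intro _; simp [nt8, noTriple]
  | cons c cs ih =>
    intro hall
    rw [List.all_cons, Bool.and_eq_true] at hall
    obtain ⟨hc, hcs⟩ := hall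
    obtain ⟨i0, i1, i2⟩ := ih hcs
    by_cases h6 : c = '6'
    · subst h6
      refine ⟨?_, ?_, ?_⟩ <;> simp [nt8, noTriple, i0]
    · have h8 : c = '8' := by
        simp [okc, h6] at hc; exact hc
      subst h8
      refine ⟨?_, ?_, ?_⟩
      · simpa [nt8, noTriple] using i1
      · simpa [nt8, noTriple] using i2
      · simp [nt8, noTriple]

lemma all_okc (l : List Char) : (l.all fun ch => ch = '6' || ch = '8') = l.all okc := rfl

-- ===== VERDICT (by name: the statement is the Claim_ definition above) =====
theorem solve_spec : Claim_equal_solve := by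
  intro n _ _
  unfold Spec_solve solve solve_alt
  cases hg : PySem.Str.pyGet? n 0 with
  | none => rfl
  | some c =>
    by_cases h6 : c = '6'
    · simp only [h6, ne_eq, not_true_eq_false, if_false]
      rw [solveLoop_eq n.toList 0 le_rfl (by norm_num), all_okc]
      cases hall : n.toList.all okc with
      | false => simp
      | true =>
        obtain ⟨i0, _, _⟩ := nt8_eq n.toList hall
        rw [i0]
    · simp [h6]
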